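-- pv_equiv track=rewrite | github.com/Pienaar-hash/hedge-fund | scripts/optimize.py | filter_valid_combinations
-- ===== SOURCE A (Python) =====
-- from typing import Any, Dict, List, Optional, Tuple, Type
--
-- def filter_valid_combinations(
--     strategy_name: str,
--     combinations: List[Dict[str, Any]],
-- ) -> List[Dict[str, Any]]:
--     """Filter out invalid parameter combinations."""
--     valid = []
--
--     for params in combinations:
--         # Strategy-specific validation
--         if strategy_name == "momentum":
--             if params.get("fast_period", 12) >= params.get("slow_period", 26):
--                 continue  # Fast must be < slow
--
--         if strategy_name == "macd":
--             if params.get("fast", 12) >= params.get("slow", 26):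
--                 continue
--
--         if strategy_name == "rsi":
--             if params.get("oversold", 30) >= params.get("overbought", 70):
--                 continue
--
--         valid.append(params)
--
--     return valid
-- ===== SOURCE B (Python) =====
-- _RULES = {
--     "momentum": ("fast_period", "slow_period", 12, 26),
--     "macd": ("fast", "slow", 12, 26),
--     "rsi": ("oversold", "overbought", 30, 70),
-- }
--
--
-- def filter_valid_combinations(strategy_name, combinations):
--     """Filter out invalid parameter combinations."""
--     valid = list(combinations)
--     rule = _RULES.get(strategy_name)
--     if rule is not None:
--         key_low, key_high, default_low, default_high = rule
--         for i in range(len(valid) - 1, -1, -1):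
--             p = valid[i]
--             if p.get(key_low, default_low) >= p.get(key_high, default_high):
--                 del valid[i]
--     return valid
-- ===== Notes on version B (the rewrite author's own statement) =====
-- stated objective: alternative
-- what changed: Instead of accumulating valid items with a per-item strategy_name if-chain, B looks the strategy's rule up once in a table, copies the whole list, and removes the invalid entries by deleting them in place while walking the index range backwards; unknown strategies return the copy untouched.
import Mathlib
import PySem

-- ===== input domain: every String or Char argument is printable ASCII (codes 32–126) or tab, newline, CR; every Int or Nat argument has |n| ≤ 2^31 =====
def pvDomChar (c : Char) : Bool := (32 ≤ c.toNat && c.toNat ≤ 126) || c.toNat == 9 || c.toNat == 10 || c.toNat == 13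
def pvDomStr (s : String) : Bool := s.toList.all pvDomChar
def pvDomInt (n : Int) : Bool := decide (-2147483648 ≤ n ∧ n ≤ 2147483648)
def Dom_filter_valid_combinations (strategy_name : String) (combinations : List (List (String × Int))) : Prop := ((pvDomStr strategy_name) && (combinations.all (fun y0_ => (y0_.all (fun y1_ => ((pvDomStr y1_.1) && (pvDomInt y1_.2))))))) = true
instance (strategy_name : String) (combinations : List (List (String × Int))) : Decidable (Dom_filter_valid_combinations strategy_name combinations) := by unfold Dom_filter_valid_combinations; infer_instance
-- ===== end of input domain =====

-- B looks the strategy's rule up once, copies the list and deletes invalid entries in place walking the index range backwards (alternative decomposition, not faster).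

-- ===== PORT A =====
-- params.get(k, d) on an association-list dict
def pvGetD (params : List (String × Int)) (k : String) (d : Int) : Int :=
  (PySem.Dict.mk params).getD k d

def filter_valid_combinations (strategy_name : String) (combinations : List (List (String × Int))) : List (List (String × Int)) :=
  combinations.foldl (fun valid params =>
    if strategy_name = "momentum" ∧ pvGetD params "fast_period" 12 ≥ pvGetD params "slow_period" 26 then
      valid  -- continue
    else if strategy_name = "macd" ∧ pvGetD params "fast" 12 ≥ pvGetD params "slow" 26 then
      valid  -- continue
    else if strategy_name = "rsi" ∧ pvGetD params "oversold" 30 ≥ pvGetD params "overbought" 70 then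
      valid  -- continue
    else
      valid ++ [params]) []

-- ===== PORT B =====
def fvcRules : PySem.Dict String (String × String × Int × Int) :=
  PySem.Dict.ofList [("momentum", ("fast_period", "slow_period", 12, 26)),
                     ("macd", ("fast", "slow", 12, 26)),
                     ("rsi", ("oversold", "overbought", 30, 70))]

-- 'for i in range(len(valid)-1, -1, -1): p = valid[i]; if bad: del valid[i]'
-- valid[i] is ported with pyGet? (the none branch is unreachable: every visited i is in range,
-- deletions only happened at larger indices); 'del valid[i]' is eraseIdx at i (i ≥ 0 on this range).
def filter_valid_combinations_alt (strategy_name : String) (combinations : List (List (String × Int))) : List (List (String × Int)) :=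
  let valid := combinations
  match fvcRules.get? strategy_name with
  | none => valid
  | some (keyLow, keyHigh, dLow, dHigh) =>
      (PySem.List.pyRange ((valid.length : Int) - 1) (-1) (-1)).foldl
        (fun valid i =>
          match PySem.List.pyGet? valid i with
          | none => valid
          | some p =>
              if pvGetD p keyLow dLow ≥ pvGetD p keyHigh dHigh then valid.eraseIdx i.toNat
              else valid) valid

-- ===== PRECONDITION & SPEC =====
def Spec_filter_valid_combinations (strategy_name : String) (combinations : List (List (String × Int))) (out : List (List (String × Int))) : Prop := out = filter_valid_combinations_alt strategy_name combinations
instance (strategy_name : String) (combinations : List (List (String × Int))) (out : List (List (String × Int))) : Decidable (Spec_filter_valid_combinations strategy_name combinations out) := by unfold Spec_filter_valid_combinations; infer_instance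

-- ===== CLAIM (what is proved, stated in full; the proofs are below) =====
def Claim_equal_filter_valid_combinations : Prop := ∀ (strategy_name : String) (combinations : List (List (String × Int))), Dom_filter_valid_combinations strategy_name combinations → Spec_filter_valid_combinations strategy_name combinations (filter_valid_combinations strategy_name combinations)

-- ===== LEMMAS AND PROOFS =====

-- the per-item keep predicate realised by A's loop body
def fvcKeep (s : String) (p : List (String × Int)) : Bool :=
  !((s = "momentum" ∧ pvGetD p "fast_period" 12 ≥ pvGetD p "slow_period" 26) ∨
    (s = "macd" ∧ pvGetD p "fast" 12 ≥ pvGetD p "slow" 26) ∨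
    (s = "rsi" ∧ pvGetD p "oversold" 30 ≥ pvGetD p "overbought" 70) : Prop)

theorem fvc_foldl (s : String) (cs : List (List (String × Int))) (acc : List (List (String × Int))) :
    cs.foldl (fun valid params =>
      if s = "momentum" ∧ pvGetD params "fast_period" 12 ≥ pvGetD params "slow_period" 26 then valid
      else if s = "macd" ∧ pvGetD params "fast" 12 ≥ pvGetD params "slow" 26 then valid
      else if s = "rsi" ∧ pvGetD params "oversold" 30 ≥ pvGetD params "overbought" 70 then valid
      else valid ++ [params]) acc = acc ++ cs.filter (fvcKeep s) := by
  induction cs generalizing acc with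
  | nil => simp
  | cons p cs ih =>
      by_cases h1 : s = "momentum" ∧ pvGetD p "fast_period" 12 ≥ pvGetD p "slow_period" 26
      · have hk : fvcKeep s p = false := by
          simp only [fvcKeep, Bool.not_eq_false', decide_eq_true_eq]; exact Or.inl h1
        rw [List.foldl_cons, if_pos h1, ih, List.filter_cons, hk]; simp
      · by_cases h2 : s = "macd" ∧ pvGetD p "fast" 12 ≥ pvGetD p "slow" 26
        · have hk : fvcKeep s p = false := by
            simp only [fvcKeep, Bool.not_eq_false', decide_eq_true_eq]; exact Or.inr (Or.inl h2)
          rw [List.foldl_cons, if_neg h1, if_pos h2, ih, List.filter_cons, hk]; simp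
        · by_cases h3 : s = "rsi" ∧ pvGetD p "oversold" 30 ≥ pvGetD p "overbought" 70
          · have hk : fvcKeep s p = false := by
              simp only [fvcKeep, Bool.not_eq_false', decide_eq_true_eq]; exact Or.inr (Or.inr h3)
            rw [List.foldl_cons, if_neg h1, if_neg h2, if_pos h3, ih, List.filter_cons, hk]; simp
          · have hk : fvcKeep s p = true := by
              simp only [fvcKeep, Bool.not_eq_true', decide_eq_false_iff_not]
              rintro (h | h | h)
              exacts [h1 h, h2 h, h3 h]
            rw [List.foldl_cons, if_neg h1, if_neg h2, if_neg h3, ih, List.filter_cons, hk]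
            simp

theorem fvc_A_eq_filter (s : String) (cs : List (List (String × Int))) :
    filter_valid_combinations s cs = cs.filter (fvcKeep s) := by
  simpa [filter_valid_combinations] using fvc_foldl s cs []

-- B's backwards-deletion loop computes a filter: invariant over the untouched prefix xs.take k
theorem fvc_del_loop (kl kh : String) (dl dh : Int)
    (xs : List (List (String × Int))) : ∀ (k : Nat) (t : List (List (String × Int))), k ≤ xs.length →
    (PySem.List.pyRange ((k : Int) - 1) (-1) (-1)).foldl
      (fun v i =>
        match PySem.List.pyGet? v i with
        | none => v
        | some p => if pvGetD p kl dl ≥ pvGetD p kh dh then v.eraseIdx i.toNat else v)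
      (xs.take k ++ t)
    = (xs.take k).filter (fun p => !decide (pvGetD p kl dl ≥ pvGetD p kh dh)) ++ t := by
  intro k
  induction k with
  | zero =>
      intro t _
      rw [PySem.List.pyRange_neg_one_eq_nil (by norm_num)]
      simp
  | succ k ih =>
      intro t hk
      have hklt : k < xs.length := hk
      rw [show ((k + 1 : Nat) : Int) - 1 = (k : Int) by push_cast; ring,
          PySem.List.pyRange_neg_one_cons (by exact_mod_cast Int.lt_of_lt_of_le (by norm_num) (Int.natCast_nonneg k)),
          List.foldl_cons]
      have htake : xs.take (k + 1) = xs.take k ++ [xs[k]] := by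
        rw [List.take_add_one]; simp [List.getElem?_eq_getElem hklt]
      have hlen : (xs.take k).length = k := List.length_take_of_le (le_of_lt hklt)
      have hget : PySem.List.pyGet? (xs.take (k+1) ++ t) (k : Int) = some xs[k] := by
        rw [PySem.List.pyGet?_natCast, htake]
        rw [List.append_assoc, List.getElem?_append_right (by omega)]
        simp [hlen]
      simp only [hget]
      by_cases hb : pvGetD xs[k] kl dl ≥ pvGetD xs[k] kh dh
      · rw [if_pos hb]
        have herase : (xs.take (k+1) ++ t).eraseIdx ((k : Int)).toNat = xs.take k ++ t := by
          rw [htake, Int.toNat_natCast, List.append_assoc,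
              List.eraseIdx_append_of_length_le (by omega)]
          simp [hlen]
        rw [herase, ih t (le_of_lt hklt), htake, List.filter_append]
        have hfalse : (!decide (pvGetD xs[k] kl dl ≥ pvGetD xs[k] kh dh)) = false := by
          rw [decide_eq_true hb]; rfl
        simp [hfalse]
      · rw [if_neg hb]
        have hsplit : xs.take (k+1) ++ t = xs.take k ++ (xs[k] :: t) := by
          rw [htake, List.append_assoc]; rfl
        rw [hsplit, ih (xs[k] :: t) (le_of_lt hklt), htake, List.filter_append]
        have htrue : (!decide (pvGetD xs[k] kl dl ≥ pvGetD xs[k] kh dh)) = true := by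
          rw [decide_eq_false hb]; rfl
        simp [htrue]

theorem fvc_B_eq_filter (kl kh : String) (dl dh : Int) (cs : List (List (String × Int))) :
    (PySem.List.pyRange ((cs.length : Int) - 1) (-1) (-1)).foldl
      (fun v i =>
        match PySem.List.pyGet? v i with
        | none => v
        | some p => if pvGetD p kl dl ≥ pvGetD p kh dh then v.eraseIdx i.toNat else v) cs
    = cs.filter (fun p => !decide (pvGetD p kl dl ≥ pvGetD p kh dh)) := by
  have := fvc_del_loop kl kh dl dh cs cs.length [] (le_refl _)
  simp only [List.take_length, List.append_nil] at this
  exact this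

-- ===== VERDICT (by name: the statement is the Claim_ definition above) =====
theorem filter_valid_combinations_spec : Claim_equal_filter_valid_combinations := by
  intro s cs _
  unfold Spec_filter_valid_combinations filter_valid_combinations_alt
  rw [fvc_A_eq_filter]
  by_cases h1 : s = "momentum"
  · subst h1
    have h : fvcRules.get? "momentum" = some ("fast_period", "slow_period", 12, 26) := by decide
    simp only [h, fvc_B_eq_filter]
    refine List.filter_congr ?_
    intro p _
    simp [fvcKeep, ← decide_not]
  · by_cases h2 : s = "macd"
    · subst h2
      have h : fvcRules.get? "macd" = some ("fast", "slow", 12, 26) := by decide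
      simp only [h, fvc_B_eq_filter]
      refine List.filter_congr ?_
      intro p _
      simp [fvcKeep, ← decide_not]
    · by_cases h3 : s = "rsi"
      · subst h3
        have h : fvcRules.get? "rsi" = some ("oversold", "overbought", 30, 70) := by decide
        simp only [h, fvc_B_eq_filter]
        refine List.filter_congr ?_
        intro p _
        simp [fvcKeep, ← decide_not]
      · have he : fvcRules = PySem.Dict.mk
            [("momentum", ("fast_period", "slow_period", 12, 26)),
             ("macd", ("fast", "slow", 12, 26)),
             ("rsi", ("oversold", "overbought", 30, 70))] := by decide
        have e1 : (("momentum" : String) == s) = false := by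
          simp [beq_eq_false_iff_ne]; exact fun h => h1 h.symm
        have e2 : (("macd" : String) == s) = false := by
          simp [beq_eq_false_iff_ne]; exact fun h => h2 h.symm
        have e3 : (("rsi" : String) == s) = false := by
          simp [beq_eq_false_iff_ne]; exact fun h => h3 h.symm
        have h : fvcRules.get? s = none := by
          rw [he]; simp [e1, e2, e3, PySem.Dict.get?]
        rw [h]
        simp [fvcKeep, h1, h2, h3]
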